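-- pv_equiv track=rewrite | github.com/brellsanwouo/AWARE | agents/parser_agent.py | _task_type_from_uncertainty
-- ===== SOURCE A (Python) =====
-- def _task_type_from_uncertainty(uncertainty: dict[str, str]) -> str:
--     requested = {
--         dim for dim, state in {
--             "time": uncertainty.get("root_cause_time"),
--             "component": uncertainty.get("root_cause_component"),
--             "reason": uncertainty.get("root_cause_reason"),
--         }.items()
--         if state == "unknown"
--     }
--     return _task_type_from_dimensions(requested) or "task_7"
--
-- def _task_type_from_dimensions(dimensions: set[str]) -> str | None:
--     if dimensions == {"time"}:
--         return "task_1"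
--     if dimensions == {"reason"}:
--         return "task_2"
--     if dimensions == {"component"}:
--         return "task_3"
--     if dimensions == {"time", "reason"}:
--         return "task_4"
--     if dimensions == {"time", "component"}:
--         return "task_5"
--     if dimensions == {"component", "reason"}:
--         return "task_6"
--     if dimensions == {"time", "component", "reason"}:
--         return "task_7"
--     return None
-- ===== SOURCE B (Python) =====
-- TABLE = [7, 1, 3, 5, 2, 4, 6, 7]
--
-- def _task_type_from_uncertainty(uncertainty: dict[str, str]) -> str:
--     mask = ((uncertainty.get("root_cause_time") == "unknown")
--             | (uncertainty.get("root_cause_component") == "unknown") << 1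
--             | (uncertainty.get("root_cause_reason") == "unknown") << 2)
--     return f"task_{TABLE[mask]}"
-- ===== Notes on version B (the rewrite author's own statement) =====
-- stated objective: simpler
-- what changed: Replaces the dict/set comprehension plus the seven-way set-equality if-chain (and the 'or task_7' fallback) with a 3-bit mask over the three uncertainty flags and a single lookup in an 8-entry table.
import Mathlib
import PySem

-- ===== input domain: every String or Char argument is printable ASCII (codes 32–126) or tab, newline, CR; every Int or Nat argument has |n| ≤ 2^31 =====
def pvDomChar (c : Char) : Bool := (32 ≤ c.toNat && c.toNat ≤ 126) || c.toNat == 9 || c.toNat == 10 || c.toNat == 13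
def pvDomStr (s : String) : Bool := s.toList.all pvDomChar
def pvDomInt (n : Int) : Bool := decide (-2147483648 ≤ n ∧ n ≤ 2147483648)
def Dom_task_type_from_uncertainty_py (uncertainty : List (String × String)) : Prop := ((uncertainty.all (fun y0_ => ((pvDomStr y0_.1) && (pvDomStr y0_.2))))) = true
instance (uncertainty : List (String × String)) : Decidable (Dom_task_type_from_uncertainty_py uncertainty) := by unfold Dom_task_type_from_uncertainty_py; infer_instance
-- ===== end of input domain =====

-- B replaces the set comprehension and the seven-way set-equality if-chain with a
-- 3-bit mask over the three flags and one lookup in an 8-entry table (objective: simpler).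

-- ===== PORT A =====
-- Python set equality (order-insensitive) on PySem.Set String
def task_type_from_dimensions_py (dimensions : PySem.Set String) : Option String :=
  if PySem.Set.equal dimensions (PySem.Set.ofList ["time"]) then some "task_1"
  else if PySem.Set.equal dimensions (PySem.Set.ofList ["reason"]) then some "task_2"
  else if PySem.Set.equal dimensions (PySem.Set.ofList ["component"]) then some "task_3"
  else if PySem.Set.equal dimensions (PySem.Set.ofList ["time", "reason"]) then some "task_4"
  else if PySem.Set.equal dimensions (PySem.Set.ofList ["time", "component"]) then some "task_5"
  else if PySem.Set.equal dimensions (PySem.Set.ofList ["component", "reason"]) then some "task_6"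
  else if PySem.Set.equal dimensions (PySem.Set.ofList ["time", "component", "reason"]) then some "task_7"
  else none

def task_type_from_uncertainty_py (uncertainty : List (String × String)) : String :=
  -- the inner dict {"time": …, "component": …, "reason": …} iterated by .items()
  let items : List (String × Option String) :=
    [("time", List.lookup "root_cause_time" uncertainty),
     ("component", List.lookup "root_cause_component" uncertainty),
     ("reason", List.lookup "root_cause_reason" uncertainty)]
  let requested : PySem.Set String :=
    PySem.Set.ofList ((items.filter (fun p => p.2 == some "unknown")).map (·.1))
  match task_type_from_dimensions_py requested with
  | some s => s
  | none => "task_7"   -- the 'or "task_7"' fallback (no returned label is the empty string)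

-- ===== PORT B =====
def pvTABLE : List Int := [7, 1, 3, 5, 2, 4, 6, 7]

def task_type_from_uncertainty_py_alt (uncertainty : List (String × String)) : String :=
  let mask : Nat :=
    (if List.lookup "root_cause_time" uncertainty == some "unknown" then 1 else 0) |||
    ((if List.lookup "root_cause_component" uncertainty == some "unknown" then 1 else 0) <<< 1) |||
    ((if List.lookup "root_cause_reason" uncertainty == some "unknown" then 1 else 0) <<< 2)
  "task_" ++ PySem.Int.toStr (pvTABLE.getD mask 0)  -- mask < 8, so the index is always in range

-- ===== PRECONDITION & SPEC =====
def Spec_task_type_from_uncertainty_py (uncertainty : List (String × String)) (out : String) : Prop := out = task_type_from_uncertainty_py_alt uncertainty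
instance (uncertainty : List (String × String)) (out : String) : Decidable (Spec_task_type_from_uncertainty_py uncertainty out) := by unfold Spec_task_type_from_uncertainty_py; infer_instance

-- ===== CLAIM (what is proved, stated in full; the proofs are below) =====
def Claim_equal_task_type_from_uncertainty_py : Prop := ∀ (uncertainty : List (String × String)), Dom_task_type_from_uncertainty_py uncertainty → Spec_task_type_from_uncertainty_py uncertainty (task_type_from_uncertainty_py uncertainty)

-- ===== LEMMAS AND PROOFS =====
-- Both ports depend on the input only through the three "== unknown" tests.
theorem pv_key3 (a b c : Option String) :
    (let items : List (String × Option String) :=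
        [("time", a), ("component", b), ("reason", c)]
     let requested : PySem.Set String :=
        PySem.Set.ofList ((items.filter (fun p => p.2 == some "unknown")).map (·.1))
     match task_type_from_dimensions_py requested with
     | some s => s
     | none => "task_7")
    =
    (let mask : Nat :=
        (if a == some "unknown" then 1 else 0) |||
        ((if b == some "unknown" then 1 else 0) <<< 1) |||
        ((if c == some "unknown" then 1 else 0) <<< 2)
     "task_" ++ PySem.Int.toStr (pvTABLE.getD mask 0)) := by
  by_cases ha : a = some "unknown" <;> by_cases hb : b = some "unknown" <;>
    by_cases hc : c = some "unknown" <;>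
    simp [ha, hb, hc, beq_iff_eq] <;> rfl

-- ===== VERDICT (by name: the statement is the Claim_ definition above) =====
theorem task_type_from_uncertainty_py_spec : Claim_equal_task_type_from_uncertainty_py := by
  intro u _
  show task_type_from_uncertainty_py u = task_type_from_uncertainty_py_alt u
  exact pv_key3 (List.lookup "root_cause_time" u)
    (List.lookup "root_cause_component" u)
    (List.lookup "root_cause_reason" u)
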